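-- pv_equiv track=rewrite | github.com/mann-WOO/SWEA | 5203_baby-gin/sol1.py | is_run
-- ===== SOURCE A (Python) =====
-- def is_run(player):
--     for i in range(10):
--         if player[i] != 0:
--             cnt = 1
--             current = i
--             while current < 9:
--                 current += 1
--                 if player[current] != 0:
--                     cnt += 1
--                     if cnt == 3:
--                         return True
--                 else:
--                     break
-- ===== SOURCE B (Python) =====
-- def is_run(player):
--     streak = 0
--     for i in range(10):
--         if player[i] != 0:
--             streak += 1
--             if streak == 3:
--                 return True
--         else:
--             streak = 0
-- ===== Notes on version B (the rewrite author's own statement) =====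
-- stated objective: simpler
-- what changed: Replaces A's nested rescan (for each nonzero start position, an inner while-loop recounting the run) with a single pass that maintains one running streak counter, returning True the moment the streak reaches 3; like A it falls off the end (returns None) and indexes player[i] for i in range(10), so it raises IndexError on exactly the same inputs.
import Mathlib
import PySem

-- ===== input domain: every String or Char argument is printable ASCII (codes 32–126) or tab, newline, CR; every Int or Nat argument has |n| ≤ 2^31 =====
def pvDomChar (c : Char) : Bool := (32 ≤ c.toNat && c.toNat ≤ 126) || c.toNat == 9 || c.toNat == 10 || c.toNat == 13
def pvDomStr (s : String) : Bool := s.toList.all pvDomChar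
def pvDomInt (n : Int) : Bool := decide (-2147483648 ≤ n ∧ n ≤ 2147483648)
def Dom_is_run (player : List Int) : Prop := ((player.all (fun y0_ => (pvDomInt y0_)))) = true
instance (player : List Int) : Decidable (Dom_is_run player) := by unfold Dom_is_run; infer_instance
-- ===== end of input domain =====

-- B replaces A's nested rescan with a single pass keeping one running streak counter (objective: simpler).


-- ===== PORT A =====
-- `player[k]` is PySem.List.pyGet?; out-of-range (Python IndexError) is excluded by Pre_,
-- outside Pre_ the port reads it as 0.
def pvNz (player : List Int) (k : Nat) : Bool := (PySem.List.pyGet? player (k : Int)).getD 0 != 0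

-- the inner `while current < 9` loop of A (returns none on break / loop exit)
def isRunInner (player : List Int) (current : Nat) (cnt : Int) : Option Bool :=
  if current < 9 then
    let current' := current + 1
    if pvNz player current' then
      if cnt + 1 = 3 then some true
      else isRunInner player current' (cnt + 1)
    else none
  else none
termination_by 9 - current

-- the outer `for i in range(10)` loop of A
def isRunOuter (player : List Int) (i : Nat) : Option Bool :=
  if i < 10 then
    if pvNz player i then
      match isRunInner player i 1 with
      | some b => some b
      | none => isRunOuter player (i + 1)
    else isRunOuter player (i + 1)
  else none
termination_by 10 - i

def is_run (player : List Int) : Option Bool := isRunOuter player 0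

-- ===== PORT B =====
-- B's `player[i] != 0` test (same Python expression, B-side copy)
def pvNzB (player : List Int) (k : Nat) : Bool := (PySem.List.pyGet? player (k : Int)).getD 0 != 0

-- single pass over i in range(10) with a running streak counter
def isRunAltGo (player : List Int) (i : Nat) (streak : Int) : Option Bool :=
  if i < 10 then
    if pvNzB player i then
      if streak + 1 = 3 then some true
      else isRunAltGo player (i + 1) (streak + 1)
    else isRunAltGo player (i + 1) 0
  else none
termination_by 10 - i

def is_run_alt (player : List Int) : Option Bool := isRunAltGo player 0 0

-- ===== PRECONDITION & SPEC =====
-- Pre_ excludes exactly the inputs on which A raises IndexError: lists shorter than 10 that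
-- contain no run of three consecutive nonzero counts (B raises IndexError there too).
def Pre_is_run (player : List Int) : Prop :=
  10 ≤ player.length ∨
    ∃ p < player.length, p + 2 < player.length ∧
      pvNz player p = true ∧ pvNz player (p + 1) = true ∧ pvNz player (p + 2) = true
instance (player : List Int) : Decidable (Pre_is_run player) := by unfold Pre_is_run; infer_instance
def pvWitness_is_run : List Int := [1, 0, 2, 2, 2, 0, 0, 1, 1, 0]
def Spec_is_run (player : List Int) (out : Option Bool) : Prop := out = is_run_alt player
instance (player : List Int) (out : Option Bool) : Decidable (Spec_is_run player out) := by unfold Spec_is_run; infer_instance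

-- ===== CLAIM (what is proved, stated in full; the proofs are below) =====
def Claim_equal_is_run : Prop := ∀ (player : List Int), Dom_is_run player → Pre_is_run player → Spec_is_run player (is_run player)

-- ===== LEMMAS AND PROOFS =====

theorem outer_ten (player : List Int) : isRunOuter player 10 = none := by
  rw [isRunOuter]; norm_num

theorem inner_two (player : List Int) (j : Nat) :
    isRunInner player j 2 = if j < 9 then (if pvNz player (j + 1) then some true else none) else none := by
  rw [isRunInner]; norm_num

-- closed form of A's inner while-loop entered with cnt = 1 at position i
theorem inner_one (player : List Int) (i : Nat) :
    isRunInner player i 1 =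
      if i < 9 ∧ pvNz player (i + 1) = true then
        (if i + 1 < 9 ∧ pvNz player (i + 2) = true then some true else none)
      else none := by
  rw [isRunInner]
  norm_num [inner_two]
  split_ifs <;> simp_all

-- the two loops agree from position i on (unconditionally: out-of-range reads count as 0)
theorem nzB_eq (player : List Int) (k : Nat) : pvNzB player k = pvNz player k := rfl

theorem outer_eq_alt (player : List Int) (n i : Nat) (h : 10 - i ≤ n) :
    isRunOuter player i = isRunAltGo player i 0 := by
  induction n generalizing i with
  | zero =>
      have hi : 10 ≤ i := by omega
      rw [isRunOuter, isRunAltGo]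
      simp only [nzB_eq]
      simp [Nat.not_lt.mpr hi]
  | succ n ih =>
      by_cases hi : i < 10
      · by_cases hz : pvNz player i
        · -- player[i] ≠ 0
          rw [isRunOuter, inner_one, isRunAltGo]
          simp only [nzB_eq]
          simp only [hi, hz, if_true]
          norm_num
          by_cases h1 : pvNz player (i + 1)
          · by_cases h19 : i < 9
            · by_cases h2 : pvNz player (i + 2)
              · by_cases h29 : i + 1 < 9
                · -- run of three found: both return some true
                  simp only [h19, h1, h29, h2, and_self, if_true]
                  rw [isRunAltGo, isRunAltGo]
                  simp only [nzB_eq]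
                  simp only [show i + 1 < 10 by omega, show i + 2 < 10 by omega, h1, h2, if_true]
                  norm_num
                · -- i = 8: inner stops at index 9; alt runs off the end
                  have hi8 : i = 8 := by omega
                  subst hi8
                  simp [isRunOuter, inner_one, h1, h2]
                  rw [isRunAltGo, isRunAltGo]
                  simp only [nzB_eq]
                  norm_num [h1]
              · -- streak of two broken at i + 2
                by_cases h29 : i + 1 < 9
                · simp only [h19, h1, and_self, if_true, h29, h2, true_and]
                  norm_num [h2]
                  rw [isRunAltGo, isRunAltGo]
                  simp only [nzB_eq]
                  simp only [show i + 1 < 10 by omega, show i + 2 < 10 by omega, h1, if_true]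
                  norm_num [h2]
                  -- outer (i+1) vs alt (i+3): peel two outer steps
                  rw [isRunOuter, inner_one]
                  simp only [show i + 1 < 10 by omega, h1, if_true]
                  norm_num [h2]
                  rw [isRunOuter]
                  simp only [show i + 2 < 10 by omega]
                  norm_num [h2]
                  exact ih (i + 3) (by omega)
                · -- i = 8 with the streak broken at index 10
                  have hi8 : i = 8 := by omega
                  subst hi8
                  simp [isRunOuter, inner_one, h1, h2]
                  rw [isRunAltGo, isRunAltGo]
                  simp only [nzB_eq]
                  norm_num [h1]
            · -- i = 9: last cell, inner loop never runs
              have hi9 : i = 9 := by omega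
              subst hi9
              rw [outer_ten, isRunAltGo]
              simp only [nzB_eq]
              norm_num
          · -- streak of one broken at i + 1
            by_cases h19 : i < 9
            · norm_num [h1]
              rw [isRunAltGo]
              simp only [nzB_eq]
              simp only [show i + 1 < 10 by omega, if_true]
              norm_num [h1]
              rw [isRunOuter]
              simp only [show i + 1 < 10 by omega]
              norm_num [h1]
              exact ih (i + 2) (by omega)
            · have hi9 : i = 9 := by omega
              subst hi9
              rw [outer_ten, isRunAltGo]
              simp only [nzB_eq]
              norm_num [h1]
        · -- player[i] = 0: both step on with a fresh start
          rw [isRunOuter, isRunAltGo]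
          simp only [nzB_eq]
          simp only [hi, hz, if_true]
          norm_num [hz]
          exact ih (i + 1) (by omega)
      · rw [isRunOuter, isRunAltGo]
        simp only [nzB_eq]
        simp [Nat.not_lt.mpr (by omega : 10 ≤ i)]

-- ===== VERDICT (by name: the statement is the Claim_ definition above) =====
theorem is_run_spec : Claim_equal_is_run := by
  intro player _ _
  unfold Spec_is_run is_run is_run_alt
  exact outer_eq_alt player 10 0 (by omega)
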